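-- pv_equiv track=rewrite | github.com/EARTHTOEDWARD/SACP-Suite | src/sacp_suite/modules/fractalhedron/core.py | build_kgram_counts
-- ===== SOURCE A (Python) =====
-- from collections import Counter
-- from typing import Dict, Iterable, List, Sequence, Tuple
--
-- def build_kgram_counts(symbolic_seq: Sequence[str], k: int) -> Counter:
--     """Count k-grams inside a discrete symbolic sequence."""
--
--     if k < 1:
--         raise ValueError("k must be >= 1")
--     counts: Counter = Counter()
--     n = len(symbolic_seq)
--     if n < k:
--         return counts
--     for i in range(n - k + 1):
--         w = tuple(symbolic_seq[i : i + k])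
--         counts[w] += 1
--     return counts
-- ===== SOURCE B (Python) =====
-- from collections import Counter
--
--
-- def build_kgram_counts(symbolic_seq, k):
--     """Count k-grams inside a discrete symbolic sequence."""
--     if k < 1:
--         raise ValueError("k must be >= 1")
--     windows = [tuple(symbolic_seq[i:i + k]) for i in range(len(symbolic_seq) - k + 1)]
--     return Counter({w: windows.count(w) for w in dict.fromkeys(windows)})
-- ===== Notes on version B (the rewrite author's own statement) =====
-- stated objective: alternative
-- what changed: Replaces A's single-pass loop that increments a Counter accumulator per window with two staged passes: materialise the window list once, deduplicate it to the distinct k-grams in first-occurrence order, then count each distinct k-gram by a scan of the window list (no incremental counter is maintained).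
import Mathlib
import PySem

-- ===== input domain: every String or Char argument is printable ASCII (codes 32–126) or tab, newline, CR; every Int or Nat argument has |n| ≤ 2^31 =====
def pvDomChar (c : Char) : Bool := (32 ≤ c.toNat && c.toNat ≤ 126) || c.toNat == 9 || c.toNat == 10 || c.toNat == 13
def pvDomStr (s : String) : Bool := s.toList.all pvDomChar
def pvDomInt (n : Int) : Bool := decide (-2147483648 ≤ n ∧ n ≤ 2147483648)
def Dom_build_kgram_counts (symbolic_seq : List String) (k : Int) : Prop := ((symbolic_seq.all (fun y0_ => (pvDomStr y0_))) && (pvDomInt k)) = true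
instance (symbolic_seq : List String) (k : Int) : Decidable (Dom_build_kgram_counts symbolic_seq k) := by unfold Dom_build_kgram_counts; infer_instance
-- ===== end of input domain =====

-- B drops A's incremental Counter accumulator: it materialises the window list, deduplicates it
-- (first-occurrence order) and counts each distinct k-gram by a scan; objective: alternative, not faster.

-- ===== PORT A =====
def build_kgram_counts (symbolic_seq : List String) (k : Int) : List (List String × Int) :=
  if k < 1 then []  -- Python raises ValueError here; excluded by Pre_
  else
    let counts : PySem.Dict (List String) Int := PySem.Dict.empty
    let n : Int := symbolic_seq.length
    if n < k then counts.items
    else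
      ((PySem.List.pyRange 0 (n - k + 1) 1).foldl
        (fun c i =>
          let w := PySem.List.slice symbolic_seq (some i) (some (i + k))  -- tuple(seq[i:i+k])
          c.modify w 0 (· + 1))                                          -- counts[w] += 1
        counts).items

-- ===== PORT B =====
def build_kgram_counts_alt (symbolic_seq : List String) (k : Int) : List (List String × Int) :=
  if k < 1 then []  -- raise ValueError; excluded by Pre_
  else
    let windows :=
      (PySem.List.pyRange 0 ((symbolic_seq.length : Int) - k + 1) 1).map
        (fun i => PySem.List.slice symbolic_seq (some i) (some (i + k)))
    -- {w: windows.count(w) for w in dict.fromkeys(windows)}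
    (PySem.List.dedup windows).map (fun w => (w, (windows.count w : Int)))

-- ===== PRECONDITION & SPEC =====
-- Pre_ excludes exactly k < 1, where the Python A raises ValueError.
def Pre_build_kgram_counts (symbolic_seq : List String) (k : Int) : Prop := 1 ≤ k
instance (symbolic_seq : List String) (k : Int) : Decidable (Pre_build_kgram_counts symbolic_seq k) := by unfold Pre_build_kgram_counts; infer_instance

def pvWitness_build_kgram_counts : List String × Int := (["a", "b", "a", "b"], 2)

def Spec_build_kgram_counts (symbolic_seq : List String) (k : Int) (out : List (List String × Int)) : Prop := out = build_kgram_counts_alt symbolic_seq k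
instance (symbolic_seq : List String) (k : Int) (out : List (List String × Int)) : Decidable (Spec_build_kgram_counts symbolic_seq k out) := by unfold Spec_build_kgram_counts; infer_instance

-- ===== CLAIM (what is proved, stated in full; the proofs are below) =====
def Claim_equal_build_kgram_counts : Prop := ∀ (symbolic_seq : List String) (k : Int), Dom_build_kgram_counts symbolic_seq k → Pre_build_kgram_counts symbolic_seq k → Spec_build_kgram_counts symbolic_seq k (build_kgram_counts symbolic_seq k)

-- ===== LEMMAS AND PROOFS =====

-- ===== VERDICT (by name: the statement is the Claim_ definition above) =====
theorem build_kgram_counts_spec : Claim_equal_build_kgram_counts := by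
  intro s k _hdom hpre
  unfold Spec_build_kgram_counts build_kgram_counts build_kgram_counts_alt
  have hk : ¬ k < 1 := not_lt.mpr hpre
  simp only [hk, if_false]
  by_cases hshort : (s.length : Int) < k
  · rw [if_pos hshort]
    have h0 : ((s.length : Int) - k + 1 - 0).toNat = 0 := by omega
    rw [PySem.List.pyRange_one, h0]
    rfl
  · rw [if_neg hshort]
    have hfold :
        (PySem.List.pyRange 0 ((s.length : Int) - k + 1) 1).foldl
            (fun c i => PySem.Dict.modify c (PySem.List.slice s (some i) (some (i + k))) 0 (· + 1))
            PySem.Dict.empty =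
          PySem.Dict.counter
            ((PySem.List.pyRange 0 ((s.length : Int) - k + 1) 1).map
              (fun i => PySem.List.slice s (some i) (some (i + k)))) := by
      rw [PySem.Dict.counter_eq_foldl, List.foldl_map]
    rw [hfold, PySem.Dict.items_counter, PySem.List.dedup_eq_ofList]
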